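-- pv_equiv track=rewrite | github.com/bhbarongreenback/uk-reporting-etfs | generate_etfs_list.py | get_best_openfigi_result
-- ===== SOURCE A (Python) =====
-- def get_best_openfigi_result(job_response):
-- 	'''
-- 	Given a response to an OpenFIGI job, return the single "most interesting"
-- 	result - either that having exchange code "US" (a "generic US ticker"),
-- 	or failing that having an exchange code from "UA" (American Stock
-- 	Exchange), "UN" (NYSE), "UR" (broadest tier of NASDAQ) or "UP" (ARCA).
-- 	'''
-- 	all_results = job_response.get('data',[])
-- 	best_result = None
-- 	for result in all_results:
-- 		exch_code = result.get('exchCode',None)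
-- 		if exch_code == 'US':
-- 			return result
-- 		elif best_result is None and exch_code in ('UA','UN','UP','UR'):
-- 			best_result = result
-- 	return best_result
-- ===== SOURCE B (Python) =====
-- def get_best_openfigi_result(job_response):
-- 	data = job_response.get('data', [])
-- 	us = next((r for r in data if r.get('exchCode') == 'US'), None)
-- 	if us is not None:
-- 		return us
-- 	return next((r for r in data if r.get('exchCode') in ('UA', 'UN', 'UP', 'UR')), None)
-- ===== Notes on version B (the rewrite author's own statement) =====
-- stated objective: simpler
-- what changed: Replaces the single stateful accumulator loop (early return on US, first-match fallback kept in a mutable best_result) with two independent filtered scans: first scan for a US match, then a scan for the first UA/UN/UP/UR match.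
import Mathlib
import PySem

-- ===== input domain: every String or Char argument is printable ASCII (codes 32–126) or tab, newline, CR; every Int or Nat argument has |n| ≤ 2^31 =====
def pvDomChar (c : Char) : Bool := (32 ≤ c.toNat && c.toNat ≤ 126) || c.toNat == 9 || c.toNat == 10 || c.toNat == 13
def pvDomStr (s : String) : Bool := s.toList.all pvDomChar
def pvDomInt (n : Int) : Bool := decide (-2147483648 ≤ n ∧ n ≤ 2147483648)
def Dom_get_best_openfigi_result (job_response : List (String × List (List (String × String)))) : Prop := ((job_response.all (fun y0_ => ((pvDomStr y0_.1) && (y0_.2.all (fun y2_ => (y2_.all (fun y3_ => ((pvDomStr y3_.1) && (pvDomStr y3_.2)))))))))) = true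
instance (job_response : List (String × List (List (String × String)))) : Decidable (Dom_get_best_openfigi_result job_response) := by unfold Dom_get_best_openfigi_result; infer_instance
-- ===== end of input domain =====

-- B replaces A's single stateful accumulator loop (early return on 'US', fallback kept in a
-- mutable best_result) with two independent filtered scans; objective: simpler. Return values only.

-- ===== PORT A =====
-- the loop: carries best_result, returns early on 'US'
def pvALoop (results : List (List (String × String))) (best : Option (List (String × String))) :
    Option (List (String × String)) :=
  match results with
  | [] => best
  | r :: rest =>
    let exch_code := (PySem.Dict.mk r).get? "exchCode"
    if exch_code = some "US" then some r
    else if best = none ∧ exch_code ∈ [some "UA", some "UN", some "UP", some "UR"] then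
      pvALoop rest (some r)
    else pvALoop rest best

def get_best_openfigi_result (job_response : List (String × List (List (String × String)))) : Option (List (String × String)) :=
  let all_results := (PySem.Dict.mk job_response).getD "data" []
  pvALoop all_results none

-- ===== PORT B =====
def get_best_openfigi_result_alt (job_response : List (String × List (List (String × String)))) : Option (List (String × String)) :=
  let data := (PySem.Dict.mk job_response).getD "data" []
  match data.find? (fun r => (PySem.Dict.mk r).get? "exchCode" == some "US") with
  | some us => some us
  | none =>
    data.find? (fun r => (PySem.Dict.mk r).get? "exchCode" ∈ [some "UA", some "UN", some "UP", some "UR"])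

-- ===== PRECONDITION & SPEC =====
def Spec_get_best_openfigi_result (job_response : List (String × List (List (String × String)))) (out : Option (List (String × String))) : Prop := out = get_best_openfigi_result_alt job_response
instance (job_response : List (String × List (List (String × String)))) (out : Option (List (String × String))) : Decidable (Spec_get_best_openfigi_result job_response out) := by unfold Spec_get_best_openfigi_result; infer_instance

-- ===== CLAIM (what is proved, stated in full; the proofs are below) =====
def Claim_equal_get_best_openfigi_result : Prop := ∀ (job_response : List (String × List (List (String × String)))), Dom_get_best_openfigi_result job_response → Spec_get_best_openfigi_result job_response (get_best_openfigi_result job_response)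

-- ===== LEMMAS AND PROOFS =====

-- characterisation of A's loop in terms of B's two scans
lemma pvALoop_eq (results : List (List (String × String))) (best : Option (List (String × String))) :
    pvALoop results best =
      match results.find? (fun r => (PySem.Dict.mk r).get? "exchCode" == some "US") with
      | some us => some us
      | none =>
        match best with
        | some b => some b
        | none => results.find? (fun r => (PySem.Dict.mk r).get? "exchCode" ∈ [some "UA", some "UN", some "UP", some "UR"]) := by
  induction results generalizing best with
  | nil => cases best <;> simp [pvALoop]
  | cons r rest ih =>
    simp only [pvALoop, List.find?]
    by_cases hus : (PySem.Dict.mk r).get? "exchCode" = some "US"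
    · simp [hus]
    · have hbeq : ((PySem.Dict.mk r).get? "exchCode" == some "US") = false := by
        simp [hus]
      by_cases hfb : (PySem.Dict.mk r).get? "exchCode" ∈ [some "UA", some "UN", some "UP", some "UR"]
      · cases best with
        | none =>
          simp only [hus, hbeq, hfb, and_true, if_false, if_true, ih]
          cases h : rest.find? (fun r => (PySem.Dict.mk r).get? "exchCode" == some "US") <;>
            simp
        | some b =>
          simp only [hus, hbeq, hfb, if_false, ih]
          simp
      · have : ¬ (best = none ∧ (PySem.Dict.mk r).get? "exchCode" ∈ [some "UA", some "UN", some "UP", some "UR"]) := by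
          tauto
        simp only [hus, hbeq, this, if_false, ih]
        cases h : rest.find? (fun r => (PySem.Dict.mk r).get? "exchCode" == some "US") <;>
          simp [hfb]

-- ===== VERDICT (by name: the statement is the Claim_ definition above) =====
theorem get_best_openfigi_result_spec : Claim_equal_get_best_openfigi_result := by
  intro job_response _
  unfold Spec_get_best_openfigi_result get_best_openfigi_result get_best_openfigi_result_alt
  simp only [pvALoop_eq]
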